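-- pv_equiv track=rewrite | github.com/GundalaNikhil/DSA | dsa-problems/Stacks/solutions/python/STK-006-assembly-previous-greater-parity.py | prev_greater_opposite_parity
-- ===== SOURCE A (Python) =====
-- def prev_greater_opposite_parity(arr: list[int]) -> list[int]:
--     n = len(arr)
--     result = [-1] * n
--
--     even_stack = [] # Indices
--     odd_stack = []  # Indices
--
--     def find_nearest_greater(stack, val):
--         # Stack has indices of decreasing values: [Big ... Small]
--         # We want the rightmost element in stack > val
--         # This corresponds to the smallest valid value in the stack
--         if not stack:
--             return -1
--
--         l, r = 0, len(stack) - 1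
--         ans_idx = -1
--
--         while l <= r:
--             mid = (l + r) // 2
--             if arr[stack[mid]] > val:
--                 ans_idx = stack[mid]
--                 l = mid + 1 # Try closer (right)
--             else:
--                 r = mid - 1
--         return ans_idx
--
--     for i, val in enumerate(arr):
--         if val % 2 == 0:
--             # Look in Odd
--             idx = find_nearest_greater(odd_stack, val)
--             if idx != -1:
--                 result[i] = arr[idx]
--
--             # Update Even
--             while even_stack and arr[even_stack[-1]] <= val:
--                 even_stack.pop()
--             even_stack.append(i)
--         else:
--             # Look in Even
--             idx = find_nearest_greater(even_stack, val)
--             if idx != -1: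
--                 result[i] = arr[idx]
--
--             # Update Odd
--             while odd_stack and arr[odd_stack[-1]] <= val:
--                 odd_stack.pop()
--             odd_stack.append(i)
--
--     return result
-- ===== SOURCE B (Python) =====
-- def prev_greater_opposite_parity(arr: list[int]) -> list[int]:
--     result = []
--     for i, v in enumerate(arr):
--         ans = -1
--         for u in reversed(arr[:i]):
--             if (u - v) % 2 != 0 and u > v:
--                 ans = u
--                 break
--         result.append(ans)
--     return result
-- ===== Notes on version B (the rewrite author's own statement) =====
-- stated objective: simpler
-- what changed: Replaced A's two parity-split monotonic index stacks with binary search over them by a plain nested backward scan: for each i, walk the reversed prefix and return the first element with opposite parity that is strictly greater.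
import Mathlib
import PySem

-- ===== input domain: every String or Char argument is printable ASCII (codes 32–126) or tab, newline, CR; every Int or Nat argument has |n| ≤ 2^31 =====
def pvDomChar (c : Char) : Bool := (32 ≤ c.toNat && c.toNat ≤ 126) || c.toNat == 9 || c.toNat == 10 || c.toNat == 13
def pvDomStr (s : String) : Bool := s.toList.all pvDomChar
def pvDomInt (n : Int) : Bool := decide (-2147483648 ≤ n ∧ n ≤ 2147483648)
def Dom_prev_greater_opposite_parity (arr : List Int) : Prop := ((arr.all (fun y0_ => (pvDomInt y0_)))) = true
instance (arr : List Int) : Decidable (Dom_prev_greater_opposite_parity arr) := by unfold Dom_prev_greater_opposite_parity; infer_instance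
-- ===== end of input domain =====

-- ===== PORT A =====
-- B replaces A's two monotonic index stacks + binary search by a plain backward scan (objective: simpler).
-- helper: the while-loop of find_nearest_greater (binary search for the rightmost stack entry with value > val)
def pvBS (arr stack : List Int) (val : Int) (l r ans : Int) : Int :=
  if hlr : l ≤ r then
    let mid := PySem.Int.floordiv (l + r) 2
    if val < PySem.List.pyGetD arr (PySem.List.pyGetD stack mid 0) 0 then
      pvBS arr stack val (mid + 1) r (PySem.List.pyGetD stack mid 0)
    else
      pvBS arr stack val l (mid - 1) ans
  else ans
termination_by (r + 1 - l).toNat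
decreasing_by
  · have h := PySem.Int.floordiv_two_mid_bounds hlr; omega
  · have h := PySem.Int.floordiv_two_mid_bounds hlr; omega

def pvFindNearestGreater (arr stack : List Int) (val : Int) : Int :=
  if stack = [] then -1
  else pvBS arr stack val 0 ((stack.length : Int) - 1) (-1)

-- helper: the while-pop loop updating a stack (pop from the end while arr[stack[-1]] <= val)
def pvPopLE (arr : List Int) (val : Int) (s : List Int) : List Int :=
  match h : s.getLast? with
  | none => s
  | some j => if PySem.List.pyGetD arr j 0 ≤ val then pvPopLE arr val s.dropLast else s
termination_by s.length
decreasing_by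
  have hne : s ≠ [] := by intro e; subst e; simp at h
  have := List.length_pos_iff.mpr hne
  simp [List.length_dropLast]; omega

-- one iteration of A's main for-loop over enumerate(arr); state = (result so far, even_stack, odd_stack)
def pvStepA (arr : List Int) (st : List Int × List Int × List Int) (iv : Int × Int) :
    List Int × List Int × List Int :=
  match st, iv with
  | (res, evenS, oddS), (i, val) =>
    if PySem.Int.mod val 2 = 0 then
      let idx := pvFindNearestGreater arr oddS val
      ((if idx ≠ -1 then res ++ [PySem.List.pyGetD arr idx 0] else res ++ [-1]),
       pvPopLE arr val evenS ++ [i], oddS)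
    else
      let idx := pvFindNearestGreater arr evenS val
      ((if idx ≠ -1 then res ++ [PySem.List.pyGetD arr idx 0] else res ++ [-1]),
       evenS, pvPopLE arr val oddS ++ [i])

def prev_greater_opposite_parity (arr : List Int) : List Int :=
  ((PySem.List.enumerate arr 0).foldl (pvStepA arr) ([], [], [])).1

-- ===== PORT B =====
-- inner backward scan: first u in the reversed prefix with opposite parity and u > v, else -1
def pvFindOpp (v : Int) : List Int → Int
  | [] => -1
  | u :: rest => if PySem.Int.mod (u - v) 2 ≠ 0 ∧ v < u then u else pvFindOpp v rest

def prev_greater_opposite_parity_alt (arr : List Int) : List Int :=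
  (PySem.List.enumerate arr 0).map
    (fun iv => pvFindOpp iv.2 ((PySem.List.slice arr none (some iv.1)).reverse))

-- ===== PRECONDITION & SPEC =====
def Spec_prev_greater_opposite_parity (arr : List Int) (out : List Int) : Prop := out = prev_greater_opposite_parity_alt arr
instance (arr : List Int) (out : List Int) : Decidable (Spec_prev_greater_opposite_parity arr out) := by unfold Spec_prev_greater_opposite_parity; infer_instance

-- ===== CLAIM (what is proved, stated in full; the proofs are below) =====
def Claim_equal_prev_greater_opposite_parity : Prop := ∀ (arr : List Int), Dom_prev_greater_opposite_parity arr → Spec_prev_greater_opposite_parity arr (prev_greater_opposite_parity arr)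

-- ===== LEMMAS AND PROOFS =====

-- value of arr at a Nat position (proof-side shorthand)
def pvG (arr : List Int) (j : Nat) : Int := arr.getD j 0

-- "j is on the parity-b monotonic stack after processing i elements": no later same-parity
-- element (before i) is ≥ arr[j]
def pvGoodP (arr : List Int) (i : Nat) (b : Int) (j : Nat) : Prop :=
  pvG arr j % 2 = b ∧ ∀ k < i, j < k → pvG arr k % 2 = b → pvG arr k < pvG arr j

def pvGoodB (arr : List Int) (i : Nat) (b : Int) (j : Nat) : Bool :=
  decide (pvG arr j % 2 = b) &&
    (List.range i).all (fun k => !decide (j < k) || !decide (pvG arr k % 2 = b) || decide (pvG arr k < pvG arr j))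

theorem pvGoodB_iff (arr : List Int) (i : Nat) (b : Int) (j : Nat) :
    pvGoodB arr i b j = true ↔ pvGoodP arr i b j := by
  simp only [pvGoodB, pvGoodP, Bool.and_eq_true, List.all_eq_true, List.mem_range,
    Bool.or_eq_true, Bool.not_eq_eq_eq_not, Bool.not_true, decide_eq_true_eq, decide_eq_false_iff_not]
  constructor
  · rintro ⟨h1, h2⟩
    exact ⟨h1, fun k hk hjk hb => by rcases h2 k hk with (h | h) | h <;> omega⟩
  · rintro ⟨h1, h2⟩
    refine ⟨h1, fun k hk => ?_⟩
    by_cases hjk : j < k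
    · by_cases hb : pvG arr k % 2 = b
      · exact Or.inr (h2 k hk hjk hb)
      · exact Or.inl (Or.inr hb)
    · exact Or.inl (Or.inl (by omega))

def pvGoodL (arr : List Int) (i : Nat) (b : Int) : List Nat :=
  (List.range i).filter (pvGoodB arr i b)

-- B's backward scan as a downward recursion over the prefix length
def pvBest (arr : List Int) : Nat → Int → Option Nat
  | 0, _ => none
  | i+1, v => if pvG arr i % 2 ≠ v % 2 ∧ v < pvG arr i then some i else pvBest arr i v

theorem pvModTwo (a : Int) : PySem.Int.mod a 2 = a % 2 := by
  exact PySem.Int.mod_eq_emod_of_pos (by norm_num)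

theorem pvMemGoodL (arr : List Int) (i : Nat) (b : Int) (j : Nat) :
    j ∈ pvGoodL arr i b ↔ j < i ∧ pvGoodP arr i b j := by
  simp [pvGoodL, List.mem_filter, pvGoodB_iff, and_comm]

theorem pvPairwiseGoodL (arr : List Int) (i : Nat) (b : Int) :
    (pvGoodL arr i b).Pairwise (fun a c => pvG arr c < pvG arr a) := by
  have h1 : (pvGoodL arr i b).Pairwise (· < ·) :=
    List.Pairwise.sublist (List.filter_sublist) List.pairwise_lt_range
  refine h1.imp_of_mem ?_
  intro a c ha hc hlt
  rcases (pvMemGoodL arr i b a).mp ha with ⟨hai, hpa⟩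
  rcases (pvMemGoodL arr i b c).mp hc with ⟨hci, hpc⟩
  exact hpa.2 c hci hlt hpc.1

theorem pvGoodP_succ (arr : List Int) (i : Nat) (b : Int) (j : Nat) (hj : j < i) :
    pvGoodP arr (i+1) b j ↔
      (pvGoodP arr i b j ∧ (pvG arr i % 2 = b → pvG arr i < pvG arr j)) := by
  constructor
  · rintro ⟨h1, h2⟩
    exact ⟨⟨h1, fun k hk => h2 k (by omega)⟩, fun hb => h2 i (by omega) hj hb⟩
  · rintro ⟨⟨h1, h2⟩, h3⟩
    refine ⟨h1, fun k hk hjk hb => ?_⟩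
    rcases Nat.lt_succ_iff_lt_or_eq.mp hk with h | h
    · exact h2 k h hjk hb
    · subst h; exact h3 hb

theorem pvGoodLSucc (arr : List Int) (i : Nat) (b : Int) :
    pvGoodL arr (i+1) b =
      if pvG arr i % 2 = b then
        (pvGoodL arr i b).filter (fun j => decide (pvG arr i < pvG arr j)) ++ [i]
      else pvGoodL arr i b := by
  have hself : ∀ (hpar : pvG arr i % 2 = b), pvGoodB arr (i+1) b i = true := by
    intro hpar
    exact (pvGoodB_iff arr (i+1) b i).mpr ⟨hpar, fun k hk hik => by omega⟩
  by_cases hpar : pvG arr i % 2 = b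
  · simp only [hpar, if_true, pvGoodL, List.range_succ, List.filter_append]
    rw [List.filter_filter]
    congr 1
    · apply List.filter_congr
      intro j hj
      have hjlt : j < i := List.mem_range.mp hj
      have : (pvGoodB arr (i+1) b j = true) ↔
          ((decide (pvG arr i < pvG arr j) && pvGoodB arr i b j) = true) := by
        simp only [Bool.and_eq_true, pvGoodB_iff, decide_eq_true_eq]
        rw [pvGoodP_succ arr i b j hjlt]
        constructor
        · rintro ⟨h1, h2⟩; exact ⟨h2 hpar, h1⟩
        · rintro ⟨h1, h2⟩; exact ⟨h2, fun _ => h1⟩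
      exact Bool.coe_iff_coe.mp this
    · simp [hself hpar]
  · rw [if_neg hpar]
    simp only [pvGoodL, List.range_succ, List.filter_append]
    have h2 : pvGoodB arr (i+1) b i = false := by
      rw [Bool.eq_false_iff]
      intro hc
      exact hpar ((pvGoodB_iff arr (i+1) b i).mp hc).1
    rw [List.filter_singleton, h2]
    simp only [cond_false, List.append_nil]
    apply List.filter_congr
    intro j hj
    have hjlt : j < i := List.mem_range.mp hj
    have : (pvGoodB arr (i+1) b j = true) ↔ (pvGoodB arr i b j = true) := by
      simp only [pvGoodB_iff]
      rw [pvGoodP_succ arr i b j hjlt]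
      constructor
      · rintro ⟨h1, _⟩; exact h1
      · intro h1; exact ⟨h1, fun hb => absurd hb hpar⟩
    exact Bool.coe_iff_coe.mp this

theorem pvPopLE_eq_filter (arr : List Int) (v : Int) (s : List Int)
    (hp : s.Pairwise (fun a c => PySem.List.pyGetD arr c 0 < PySem.List.pyGetD arr a 0)) :
    pvPopLE arr v s = s.filter (fun x => decide (v < PySem.List.pyGetD arr x 0)) := by
  fun_induction pvPopLE arr v s with
  | case1 s h => simp [List.getLast?_eq_none_iff.mp h]
  | case2 s j hlast hle ih =>
    have hne : s ≠ [] := by intro e; subst e; simp at hlast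
    have hsplit : s.dropLast ++ [j] = s := by
      have := List.dropLast_append_getLast hne
      rwa [List.getLast_eq_iff_getLast?_eq_some hne |>.mpr hlast] at this
    have hpd : s.dropLast.Pairwise
        (fun a c => PySem.List.pyGetD arr c 0 < PySem.List.pyGetD arr a 0) :=
      hp.sublist (List.dropLast_sublist s)
    rw [ih hpd, ← hsplit, List.filter_append, List.filter_singleton]
    simp [not_lt.mpr hle]
  | case3 s j hlast hgt =>
    have hne : s ≠ [] := by intro e; subst e; simp at hlast
    have hsplit : s.dropLast ++ [j] = s := by
      have := List.dropLast_append_getLast hne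
      rwa [List.getLast_eq_iff_getLast?_eq_some hne |>.mpr hlast] at this
    symm
    apply List.filter_eq_self.mpr
    intro x hx
    rw [← hsplit] at hx hp
    rcases List.mem_append.mp hx with hx | hx
    · have := (List.pairwise_append.mp hp).2.2 x hx j (by simp)
      simp only [decide_eq_true_eq]
      omega
    · simp only [List.mem_singleton] at hx
      subst hx
      simp only [decide_eq_true_eq]
      omega

theorem pvFilterPrefix (arr : List Int) (v : Int) (s : List Int)
    (hp : s.Pairwise (fun a c => PySem.List.pyGetD arr c 0 < PySem.List.pyGetD arr a 0)) :
    s.filter (fun x => decide (v < PySem.List.pyGetD arr x 0)) =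
      s.take (s.countP (fun x => decide (v < PySem.List.pyGetD arr x 0))) := by
  induction s with
  | nil => simp
  | cons x t ih =>
    rcases List.pairwise_cons.mp hp with ⟨hx, ht⟩
    by_cases hpx : v < PySem.List.pyGetD arr x 0
    · have hcnt : (x :: t).countP (fun y => decide (v < PySem.List.pyGetD arr y 0)) =
          t.countP (fun y => decide (v < PySem.List.pyGetD arr y 0)) + 1 := by
        rw [List.countP_cons]; simp [hpx]
      rw [List.filter_cons_of_pos (by simpa using hpx), hcnt, List.take_succ_cons, ih ht]
    · have hall : ∀ y ∈ x :: t, ¬ (v < PySem.List.pyGetD arr y 0) := by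
        intro y hy
        rcases List.mem_cons.mp hy with hy | hy
        · subst hy; exact hpx
        · have := hx y hy; omega
      have hc0 : (x :: t).countP (fun x => decide (v < PySem.List.pyGetD arr x 0)) = 0 := by
        apply List.countP_eq_zero.mpr
        intro y hy
        simpa using hall y hy
      rw [hc0, List.take_zero, List.filter_eq_nil_iff.mpr]
      intro y hy
      simpa using hall y hy

theorem pvPredPos (arr : List Int) (v : Int) (s : List Int)
    (hp : s.Pairwise (fun a c => PySem.List.pyGetD arr c 0 < PySem.List.pyGetD arr a 0))
    (p : Nat) (hplen : p < s.length) :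
    (v < PySem.List.pyGetD arr (s.getD p 0) 0) ↔
      p < s.countP (fun x => decide (v < PySem.List.pyGetD arr x 0)) := by
  set pred := (fun x => decide (v < PySem.List.pyGetD arr x 0)) with hpred
  set c := s.countP pred with hc
  have hft : s.filter pred = s.take c := pvFilterPrefix arr v s hp
  have hclen : c ≤ s.length := List.countP_le_length
  have hget : s.getD p 0 = s[p] := List.getD_eq_getElem s 0 hplen
  constructor
  · intro hlt
    by_contra hge
    push Not at hge
    have hsplit : s = s.take c ++ s.drop c := (List.take_append_drop c s).symm
    have hcount : s.countP pred = (s.take c).countP pred + (s.drop c).countP pred := by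
      conv_lhs => rw [hsplit]
      exact List.countP_append
    have htc : (s.take c).countP pred = c := by
      rw [← hft, List.countP_eq_length_filter, List.filter_filter]
      simp only [Bool.and_self]
      rw [← List.countP_eq_length_filter, ← hc]
    have hdz : (s.drop c).countP pred = 0 := by omega
    have hmem : s[p] ∈ s.drop c := by
      have : (s.drop c)[p - c]'(by simp; omega) = s[p] := by
        rw [List.getElem_drop]
        congr 1
        omega
      rw [← this]
      exact List.getElem_mem _
    have := List.countP_eq_zero.mp hdz _ hmem
    rw [hget] at hlt
    simp [hpred] at this
    omega
  · intro hpc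
    have hmem : s[p] ∈ s.filter pred := by
      rw [hft]
      have : (s.take c)[p]'(by simp; omega) = s[p] := List.getElem_take
      rw [← this]
      exact List.getElem_mem _
    have := List.of_mem_filter hmem
    rw [hget]
    simpa [hpred] using this

theorem pvBS_eq (arr : List Int) (v : Int) (s : List Int)
    (hp : s.Pairwise (fun a c => PySem.List.pyGetD arr c 0 < PySem.List.pyGetD arr a 0))
    (n : Nat) (l r ans : Int) (hn : (r + 1 - l).toNat = n) (hl : 0 ≤ l)
    (hr : r < (s.length : Int))
    (hlc : l ≤ ((s.countP (fun x => decide (v < PySem.List.pyGetD arr x 0)) : Nat) : Int))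
    (hcr : ((s.countP (fun x => decide (v < PySem.List.pyGetD arr x 0)) : Nat) : Int) ≤ r + 1)
    (hans : ans = (if l = 0 then -1 else s.getD (l.toNat - 1) 0)) :
    pvBS arr s v l r ans =
      (if s.countP (fun x => decide (v < PySem.List.pyGetD arr x 0)) = 0 then -1
       else s.getD (s.countP (fun x => decide (v < PySem.List.pyGetD arr x 0)) - 1) 0) := by
  induction n using Nat.strong_induction_on generalizing l r ans with
  | _ n ih =>
  subst hn
  set c := s.countP (fun x => decide (v < PySem.List.pyGetD arr x 0)) with hcdef
  rw [pvBS]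
  by_cases hlr : l ≤ r
  · rw [dif_pos hlr]
    have hmid := PySem.Int.floordiv_two_mid_bounds hlr
    set mid := PySem.Int.floordiv (l + r) 2 with hmiddef
    have hmid0 : 0 ≤ mid := le_trans hl hmid.1
    have hmidlen : mid < (s.length : Int) := lt_of_le_of_lt hmid.2 hr
    have hcast : mid = ((mid.toNat : Nat) : Int) := by omega
    have hgetstack : PySem.List.pyGetD s mid 0 = s.getD mid.toNat 0 := by
      have h := PySem.List.pyGetD_natCast s mid.toNat 0
      rwa [← hcast] at h
    have hpos := pvPredPos arr v s hp mid.toNat (by omega)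
    by_cases hcond : v < PySem.List.pyGetD arr (PySem.List.pyGetD s mid 0) 0
    · rw [if_pos hcond]
      rw [hgetstack] at hcond
      have hmc : mid.toNat < c := hpos.mp hcond
      refine ih (r + 1 - (mid + 1)).toNat (by omega) (mid + 1) r _ rfl (by omega) hr
        (by omega) (by omega) ?_
      rw [if_neg (by omega), hgetstack]
      congr 1
      omega
    · rw [if_neg hcond]
      rw [hgetstack] at hcond
      have hmc : c ≤ mid.toNat := by
        by_contra h
        exact hcond (hpos.mpr (by omega))
      exact ih (mid - 1 + 1 - l).toNat (by omega) l (mid - 1) ans rfl hl (by omega)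
        hlc (by omega) hans
  · rw [dif_neg hlr]
    have hceq : (c : Int) = l := by omega
    rw [hans]
    by_cases hl0 : l = 0
    · rw [if_pos hl0, if_pos (by omega)]
    · rw [if_neg hl0, if_neg (by omega)]
      congr 1
      omega

theorem pvFindNG_eq (arr : List Int) (v : Int) (s : List Int)
    (hp : s.Pairwise (fun a c => PySem.List.pyGetD arr c 0 < PySem.List.pyGetD arr a 0)) :
    pvFindNearestGreater arr s v =
      (if s.countP (fun x => decide (v < PySem.List.pyGetD arr x 0)) = 0 then -1
       else s.getD (s.countP (fun x => decide (v < PySem.List.pyGetD arr x 0)) - 1) 0) := by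
  unfold pvFindNearestGreater
  by_cases hs : s = []
  · subst hs
    simp
  · rw [if_neg hs]
    have hlen : 0 < s.length := List.length_pos_iff.mpr hs
    exact pvBS_eq arr v s hp _ 0 ((s.length : Int) - 1) (-1) rfl (by omega) (by omega)
      (by positivity)
      (by have := List.countP_le_length (p := fun x => decide (v < PySem.List.pyGetD arr x 0)) (l := s); omega) (by simp)

theorem pvFindOpp_take (arr : List Int) (v : Int) (i : Nat) (hi : i ≤ arr.length) :
    pvFindOpp v ((arr.take i).reverse) =
      (match pvBest arr i v with | some j => pvG arr j | none => -1) := by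
  induction i with
  | zero => simp [pvBest, pvFindOpp]
  | succ i ih =>
    have hi' : i < arr.length := by omega
    have htake : arr.take (i+1) = arr.take i ++ [arr[i]] := by
      rw [List.take_add_one]
      simp [List.getElem?_eq_getElem hi']
    have hg : pvG arr i = arr[i] := List.getD_eq_getElem arr 0 hi'
    rw [htake, List.reverse_append]
    simp only [List.reverse_singleton, List.singleton_append]
    rw [pvFindOpp]
    have hcond : (PySem.Int.mod (arr[i] - v) 2 ≠ 0 ∧ v < arr[i]) ↔
        (pvG arr i % 2 ≠ v % 2 ∧ v < pvG arr i) := by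
      rw [pvModTwo, hg]
      constructor
      · rintro ⟨h1, h2⟩; exact ⟨by omega, h2⟩
      · rintro ⟨h1, h2⟩; exact ⟨by omega, h2⟩
    by_cases hc : pvG arr i % 2 ≠ v % 2 ∧ v < pvG arr i
    · rw [if_pos (hcond.mpr hc)]
      simp only [pvBest]
      rw [if_pos hc]
      simp [hg]
    · rw [if_neg (fun h => hc (hcond.mp h))]
      simp only [pvBest, if_neg hc]
      exact ih (by omega)

theorem pvBest_eq_getLast (arr : List Int) (v : Int) (i : Nat) :
    pvBest arr i v =
      ((pvGoodL arr i (1 - v % 2)).filter (fun j => decide (v < pvG arr j))).getLast? := by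
  induction i with
  | zero => simp [pvBest, pvGoodL]
  | succ i ih =>
    set b := 1 - v % 2 with hb
    have hv2 : v % 2 = 0 ∨ v % 2 = 1 := Int.emod_two_eq v
    have hgi2 : pvG arr i % 2 = 0 ∨ pvG arr i % 2 = 1 := Int.emod_two_eq (pvG arr i)
    rw [pvGoodLSucc]
    by_cases hpar : pvG arr i % 2 = b
    · rw [if_pos hpar, List.filter_append, List.filter_singleton]
      by_cases hlt : v < pvG arr i
      · have : pvBest arr (i+1) v = some i := by
          simp only [pvBest]
          rw [if_pos ⟨by omega, hlt⟩]
        have hd : decide (v < pvG arr i) = true := by simpa using hlt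
        rw [this, hd]
        simp only [cond_true]
        rw [List.getLast?_concat]
      · have : pvBest arr (i+1) v = pvBest arr i v := by
          simp only [pvBest]
          rw [if_neg (by push Not; intro _; omega)]
        have hd : decide (v < pvG arr i) = false := by simpa using hlt
        rw [this, hd]
        simp only [cond_false, List.append_nil]
        rw [List.filter_filter, ih]
        congr 1
        apply List.filter_congr
        intro j _
        by_cases hvj : v < pvG arr j
        · have h2 : pvG arr i < pvG arr j := by omega
          simp [hvj, h2]
        · simp [hvj]
    · rw [if_neg hpar]
      have : pvBest arr (i+1) v = pvBest arr i v := by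
        simp only [pvBest]
        rw [if_neg (by push Not; intro h; omega)]
      rw [this, ih]

theorem pvPairwiseMap (arr : List Int) (i : Nat) (b : Int) :
    ((pvGoodL arr i b).map (fun (j : Nat) => (j : Int))).Pairwise
      (fun a c => PySem.List.pyGetD arr c 0 < PySem.List.pyGetD arr a 0) := by
  rw [List.pairwise_map]
  refine (pvPairwiseGoodL arr i b).imp ?_
  intro a c h
  simpa [PySem.List.pyGetD_natCast, pvG] using h

theorem pvFilterMap (arr : List Int) (v : Int) (i : Nat) (b : Int) :
    ((pvGoodL arr i b).map (fun (j : Nat) => (j : Int))).filter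
        (fun x => decide (v < PySem.List.pyGetD arr x 0)) =
      ((pvGoodL arr i b).filter (fun j => decide (v < pvG arr j))).map (fun (j : Nat) => (j : Int)) := by
  rw [List.filter_map]
  congr 1
  apply List.filter_congr
  intro j _
  simp [Function.comp, PySem.List.pyGetD_natCast, pvG]

theorem pvStepValue (arr : List Int) (v : Int) (i : Nat) (hi : i ≤ arr.length) :
    (if pvFindNearestGreater arr ((pvGoodL arr i (1 - v % 2)).map (fun (j : Nat) => (j : Int))) v ≠ -1
     then PySem.List.pyGetD arr
        (pvFindNearestGreater arr ((pvGoodL arr i (1 - v % 2)).map (fun (j : Nat) => (j : Int))) v) 0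
     else -1) =
      pvFindOpp v ((arr.take i).reverse) := by
  set b := 1 - v % 2 with hb
  set L := pvGoodL arr i b with hL
  set F := L.filter (fun j => decide (v < pvG arr j)) with hF
  set s := L.map (fun (j : Nat) => (j : Int)) with hs
  have hpmap := pvPairwiseMap arr i b
  have hfil : s.filter (fun x => decide (v < PySem.List.pyGetD arr x 0)) =
      F.map (fun (j : Nat) => (j : Int)) := pvFilterMap arr v i b
  have hslen : s.length = L.length := List.length_map _
  have hFle : F.length ≤ L.length := List.length_filter_le _ _
  have hceq : s.countP (fun x => decide (v < PySem.List.pyGetD arr x 0)) = F.length := by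
    rw [List.countP_eq_length_filter, hfil, List.length_map]
  rw [pvFindNG_eq arr v s hpmap, hceq]
  rw [pvFindOpp_take arr v i hi, pvBest_eq_getLast arr v i, ← hb, ← hL, ← hF]
  by_cases hFz : F.length = 0
  · rw [if_pos hFz]
    rw [List.length_eq_zero_iff.mp hFz]
    simp
  · rw [if_neg hFz]
    have h1 : s.filter (fun x => decide (v < PySem.List.pyGetD arr x 0)) =
        s.take (s.countP (fun x => decide (v < PySem.List.pyGetD arr x 0))) :=
      pvFilterPrefix arr v s hpmap
    rw [hceq] at h1
    have hc1s : F.length - 1 < s.length := by omega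
    have hgetd : s.getD (F.length - 1) 0 = ((F.getD (F.length - 1) 0 : Nat) : Int) := by
      have e3 : s.take F.length = F.map (fun (j : Nat) => (j : Int)) := by rw [← h1, hfil]
      rw [List.getD_eq_getElem?_getD,
        ← List.getElem?_take_of_lt (l := s) (j := F.length) (by omega : F.length - 1 < F.length),
        e3, List.getElem?_map,
        List.getElem?_eq_getElem (by omega : F.length - 1 < F.length),
        List.getD_eq_getElem F 0 (by omega : F.length - 1 < F.length)]
      rfl
    rw [hgetd]
    have hnn : (0:Int) ≤ ((F.getD (F.length - 1) 0 : Nat) : Int) := Int.natCast_nonneg _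
    rw [if_pos (by omega), PySem.List.pyGetD_natCast]
    have hlast : F.getLast? = some (F.getD (F.length - 1) 0) := by
      rw [List.getLast?_eq_getElem?, List.getElem?_eq_getElem (by omega : F.length - 1 < F.length),
        List.getD_eq_getElem F 0 (by omega : F.length - 1 < F.length)]
    rw [hlast]
    rfl

theorem pvStackUpdate (arr : List Int) (i : Nat) (b : Int) (hbi : pvG arr i % 2 = b) :
    pvPopLE arr (pvG arr i) ((pvGoodL arr i b).map (fun (j : Nat) => (j : Int))) ++ [((i : Nat) : Int)] =
      (pvGoodL arr (i+1) b).map (fun (j : Nat) => (j : Int)) := by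
  rw [pvPopLE_eq_filter _ _ _ (pvPairwiseMap arr i b), pvFilterMap arr (pvG arr i) i b,
    pvGoodLSucc, if_pos hbi, List.map_append]
  rfl

theorem pvFoldInv (arr : List Int) (i : Nat) (hi : i ≤ arr.length) :
    ((PySem.List.enumerate arr 0).take i).foldl (pvStepA arr) ([], [], []) =
      ((List.range i).map (fun j => pvFindOpp (pvG arr j) ((arr.take j).reverse)),
       (pvGoodL arr i 0).map (fun (j : Nat) => (j : Int)),
       (pvGoodL arr i 1).map (fun (j : Nat) => (j : Int))) := by
  induction i with
  | zero => simp [pvGoodL]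
  | succ i ih =>
    have hi' : i < arr.length := by omega
    have hget : (PySem.List.enumerate arr 0)[i]? = some (((i : Nat) : Int), arr[i]) := by
      rw [PySem.List.getElem?_enumerate, List.getElem?_eq_getElem hi']
      simp
    rw [List.take_add_one, hget]
    simp only [Option.toList_some]
    rw [List.foldl_append, ih (by omega), List.foldl_cons, List.foldl_nil]
    have hg : arr[i] = pvG arr i := (List.getD_eq_getElem arr 0 hi').symm
    have hv2 : pvG arr i % 2 = 0 ∨ pvG arr i % 2 = 1 := Int.emod_two_eq _
    rw [pvStepA, hg]
    have hres : ∀ b, b = 1 - pvG arr i % 2 →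
        (if pvFindNearestGreater arr ((pvGoodL arr i b).map (fun (j : Nat) => (j : Int)))
              (pvG arr i) ≠ -1
         then (List.range i).map (fun j => pvFindOpp (pvG arr j) ((arr.take j).reverse)) ++
            [PySem.List.pyGetD arr
              (pvFindNearestGreater arr ((pvGoodL arr i b).map (fun (j : Nat) => (j : Int)))
                (pvG arr i)) 0]
         else (List.range i).map (fun j => pvFindOpp (pvG arr j) ((arr.take j).reverse)) ++ [-1]) =
        (List.range (i+1)).map (fun j => pvFindOpp (pvG arr j) ((arr.take j).reverse)) := by
      intro b hbdef
      rw [List.range_succ, List.map_append, List.map_singleton]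
      have := pvStepValue arr (pvG arr i) i (by omega)
      rw [← hbdef] at this
      have hsplit : ∀ (R : List Int) (cond : Prop) (inst : Decidable cond) (x : Int),
          (if cond then R ++ [x] else R ++ [-1]) = R ++ [if cond then x else -1] := by
        intro R cond inst x
        split <;> rfl
      rw [hsplit, this]
    by_cases hpar : PySem.Int.mod (pvG arr i) 2 = 0
    · rw [if_pos hpar]
      rw [pvModTwo] at hpar
      have h1 : (1 : Int) = 1 - pvG arr i % 2 := by omega
      refine Prod.ext ?_ (Prod.ext ?_ ?_) <;> simp only
      · exact hres 1 h1
      · exact pvStackUpdate arr i 0 (by omega)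
      · rw [pvGoodLSucc, if_neg (by omega)]
    · rw [if_neg hpar]
      rw [pvModTwo] at hpar
      have h0 : (0 : Int) = 1 - pvG arr i % 2 := by omega
      refine Prod.ext ?_ (Prod.ext ?_ ?_) <;> simp only
      · exact hres 0 h0
      · rw [pvGoodLSucc, if_neg (by omega)]
      · exact pvStackUpdate arr i 1 (by omega)

theorem pvAltChar (arr : List Int) :
    prev_greater_opposite_parity_alt arr =
      (List.range arr.length).map (fun j => pvFindOpp (pvG arr j) ((arr.take j).reverse)) := by
  rw [prev_greater_opposite_parity_alt, PySem.List.enumerate_eq_map_pyRange arr 0]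
  have hlen : PySem.List.len arr = (arr.length : Int) := rfl
  rw [hlen, PySem.List.pyRange_zero_natCast, List.map_map, List.map_map]
  apply List.map_congr_left
  intro j _
  simp [Function.comp, PySem.List.pyGetD_natCast, PySem.List.slice_to_natCast, pvG]

-- ===== VERDICT (by name: the statement is the Claim_ definition above) =====
theorem prev_greater_opposite_parity_spec : Claim_equal_prev_greater_opposite_parity := by
  intro arr _
  unfold Spec_prev_greater_opposite_parity
  have h := pvFoldInv arr arr.length (le_refl _)
  rw [List.take_of_length_le (by simp [PySem.List.length_enumerate])] at h
  rw [prev_greater_opposite_parity, h, pvAltChar]
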